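-- pv_equiv track=rewrite | github.com/cabeatty/python-rsa | block.py | bv2st
-- ===== SOURCE A (Python) =====
-- ind =  ["00","01","02","03","04","05","06","07","08","09","10","11","12","13","14","15","16","17","18","19","20","21","22","23","24","25"]
--
-- alph = [ "A", "B", "C", "D", "E", "F", "G", "H", "I", "J", "K", "L", "M", "N", "O", "P", "Q", "R", "S", "T", "U", "V", "W", "X", "Y", "Z"]
--
-- def bv2st(input):
--     inter, output = [], []
--     for i in range(len(input)):
--         temp = str(input[i])
--         while ( len(temp) != 4 ):
--             temp = "0" + temp
--         f, s = temp[0] + temp[1], temp[2] + temp[3]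
--         inter.append(f)
--         inter.append(s)
--     for i in range(len(inter)):
--         for j in range(len(ind)):
--             if (inter[i] == ind[j]):
--                 output.append(alph[j])
--     return output
-- ===== SOURCE B (Python) =====
-- def bv2st(input):
--     output = []
--     for n in input:
--         s = str(n)
--         s = "0" * (4 - len(s)) + s
--         for chunk in (s[:2], s[2:]):
--             if chunk.isdigit():
--                 v = 10 * (ord(chunk[0]) - 48) + (ord(chunk[1]) - 48)
--                 if v < 26:
--                     output.append(chr(65 + v))
--     return output
-- ===== Notes on version B (the rewrite author's own statement) =====
-- stated objective: simpler
-- what changed: Single pass per block that pads with string multiplication and computes each letter arithmetically from the chunk's digit codes (chr(65+v) with a 0<=v<26 bound check), eliminating A's intermediate chunk list and its nested 26-entry table scan and both lookup tables.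
import Mathlib
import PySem

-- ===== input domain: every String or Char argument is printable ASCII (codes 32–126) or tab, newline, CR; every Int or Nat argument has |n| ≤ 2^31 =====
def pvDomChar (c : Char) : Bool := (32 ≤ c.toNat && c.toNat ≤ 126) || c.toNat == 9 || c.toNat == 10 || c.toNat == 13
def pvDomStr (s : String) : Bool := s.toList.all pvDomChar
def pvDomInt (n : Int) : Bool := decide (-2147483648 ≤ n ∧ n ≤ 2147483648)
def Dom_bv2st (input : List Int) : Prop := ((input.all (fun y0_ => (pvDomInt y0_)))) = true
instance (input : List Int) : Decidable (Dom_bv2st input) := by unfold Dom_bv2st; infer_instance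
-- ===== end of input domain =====

-- B replaces A's intermediate chunk list and nested 26-entry table scan by a single pass that
-- computes each letter arithmetically from the chunk's digit codes (objective: simpler).

-- ===== PORT A =====
def pvInd : List String := ["00","01","02","03","04","05","06","07","08","09","10","11","12","13","14","15","16","17","18","19","20","21","22","23","24","25"]

def pvAlph : List String := ["A","B","C","D","E","F","G","H","I","J","K","L","M","N","O","P","Q","R","S","T","U","V","W","X","Y","Z"]

-- A's 'while len(temp) != 4: temp = "0" + temp' (diverges in Python when len > 4; the '≥'
-- guard only totalizes the port — those inputs are excluded by Pre_bv2st).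
def pvPadA (t : List Char) : List Char :=
  if t.length ≥ 4 then t else pvPadA ('0' :: t)
termination_by 4 - t.length
decreasing_by simp at *; omega

-- Python strings are ported through List Char (PySem bridge); temp[k] is in range because
-- pvPadA always returns at least 4 characters.
def bv2st (input : List Int) : List String :=
  let inter := input.foldl (fun acc x =>
    let temp := pvPadA (PySem.Int.toStr x).toList
    let f := String.ofList [temp.getD 0 ' ', temp.getD 1 ' ']
    let s := String.ofList [temp.getD 2 ' ', temp.getD 3 ' ']
    (acc ++ [f]) ++ [s]) ([] : List String)
  inter.foldl (fun output c =>
    (List.range pvInd.length).foldl (fun o j =>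
      if c = pvInd.getD j "" then o ++ [pvAlph.getD j ""] else o) output) ([] : List String)

-- ===== PORT B =====
def bv2st_alt (input : List Int) : List String :=
  input.foldl (fun output n =>
    let s0 := (PySem.Int.toStr n).toList
    let s := List.replicate (4 - s0.length) '0' ++ s0            -- "0" * (4 - len(s)) + s
    [s.take 2, s.drop 2].foldl (fun o c =>
      if PySem.Chars.strIsdigit c then
        let v : Int := 10 * ((c.getD 0 ' ').toNat - 48) + ((c.getD 1 ' ').toNat - 48)
        if v < 26 then o ++ [String.ofList [Char.ofNat (65 + v).toNat]] else o
      else o) output) ([] : List String)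

-- ===== PRECONDITION & SPEC =====
-- Pre_ excludes exactly the inputs on which A's padding loop never terminates in Python
-- (an element whose str() has more than 4 characters, i.e. x ≥ 10000 or x ≤ -1000).
def Pre_bv2st (input : List Int) : Prop := ∀ x ∈ input, -999 ≤ x ∧ x ≤ 9999
instance (input : List Int) : Decidable (Pre_bv2st input) := by unfold Pre_bv2st; infer_instance
def pvWitness_bv2st : List Int := [105, -3, 2500]
def Spec_bv2st (input : List Int) (out : List String) : Prop := out = bv2st_alt input
instance (input : List Int) (out : List String) : Decidable (Spec_bv2st input out) := by unfold Spec_bv2st; infer_instance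

-- ===== CLAIM (what is proved, stated in full; the proofs are below) =====
def Claim_equal_bv2st : Prop := ∀ (input : List Int), Dom_bv2st input → Pre_bv2st input → Spec_bv2st input (bv2st input)

-- ===== LEMMAS AND PROOFS =====

-- what A's inner table scan contributes for one chunk string
def pvScan (c : String) : List String :=
  ((List.range pvInd.length).filter (fun j => decide (c = pvInd.getD j ""))).map (fun j => pvAlph.getD j "")

-- what B's chunk test contributes for one chunk
def pvH (c : List Char) : List String :=
  if PySem.Chars.strIsdigit c then
    if 10 * (((c.getD 0 ' ').toNat : Int) - 48) + (((c.getD 1 ' ').toNat : Int) - 48) < 26 then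
      [String.ofList [Char.ofNat (65 + (10 * (((c.getD 0 ' ').toNat : Int) - 48) + (((c.getD 1 ' ').toNat : Int) - 48))).toNat]]
    else []
  else []

def pvChunkVal (a b : Char) : List String :=
  if PySem.Chars.strIsdigit [a, b] then
    if 10 * ((a.toNat : Int) - 48) + ((b.toNat : Int) - 48) < 26 then
      [String.ofList [Char.ofNat (65 + (10 * ((a.toNat : Int) - 48) + ((b.toNat : Int) - 48))).toNat]]
    else []
  else []

lemma pvScan_from (o : List String) (c : String) :
    (List.range pvInd.length).foldl (fun o j => if c = pvInd.getD j "" then o ++ [pvAlph.getD j ""] else o) o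
    = o ++ pvScan c := by
  rw [PySem.List.foldl_append_ite (fun j => c = pvInd.getD j "") (fun j => pvAlph.getD j "")]; rfl

lemma pvA_eq (input : List Int) : bv2st input = input.flatMap (fun x =>
    let t := pvPadA (PySem.Int.toStr x).toList
    pvScan (String.ofList [t.getD 0 ' ', t.getD 1 ' ']) ++ pvScan (String.ofList [t.getD 2 ' ', t.getD 3 ' '])) := by
  unfold bv2st
  simp only [List.append_assoc, List.singleton_append, pvScan_from]
  rw [PySem.List.foldl_append_eq_flatMap (g := fun x =>
      [String.ofList [(pvPadA (PySem.Int.toStr x).toList).getD 0 ' ', (pvPadA (PySem.Int.toStr x).toList).getD 1 ' '],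
       String.ofList [(pvPadA (PySem.Int.toStr x).toList).getD 2 ' ', (pvPadA (PySem.Int.toStr x).toList).getD 3 ' ']])]
  rw [PySem.List.foldl_append_eq_flatMap (g := pvScan)]
  simp [List.flatMap_assoc]

lemma pvB_step (o : List String) (c : List Char) :
      (if PySem.Chars.strIsdigit c then
        if 10 * (((c.getD 0 ' ').toNat : Int) - 48) + (((c.getD 1 ' ').toNat : Int) - 48) < 26 then
          o ++ [String.ofList [Char.ofNat (65 + (10 * (((c.getD 0 ' ').toNat : Int) - 48) + (((c.getD 1 ' ').toNat : Int) - 48))).toNat]]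
        else o
      else o) = o ++ pvH c := by
  by_cases h1 : PySem.Chars.strIsdigit c
  · simp only [pvH, if_pos h1]
    split_ifs <;> simp
  · simp [pvH, h1]

lemma pvB_eq (input : List Int) : bv2st_alt input = input.flatMap (fun n =>
    let s := List.replicate (4 - (PySem.Int.toStr n).toList.length) '0' ++ (PySem.Int.toStr n).toList
    pvH (s.take 2) ++ pvH (s.drop 2)) := by
  unfold bv2st_alt
  simp only [List.foldl_cons, List.foldl_nil, pvB_step, List.append_assoc]
  rw [PySem.List.foldl_append_eq_flatMap (g := fun n =>
      pvH ((List.replicate (4 - (PySem.Int.toStr n).toList.length) '0' ++ (PySem.Int.toStr n).toList).take 2) ++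
      pvH ((List.replicate (4 - (PySem.Int.toStr n).toList.length) '0' ++ (PySem.Int.toStr n).toList).drop 2))]
  simp

lemma pvPadA_eq (t : List Char) (h : t.length ≤ 4) :
    pvPadA t = List.replicate (4 - t.length) '0' ++ t := by
  obtain ⟨k, hk⟩ : ∃ k, 4 - t.length = k := ⟨_, rfl⟩
  induction k generalizing t with
  | zero =>
    rw [pvPadA]
    simp only [hk, List.replicate_zero, List.nil_append, if_pos (by omega : t.length ≥ 4)]
  | succ k ih =>
    rw [pvPadA, if_neg (by omega : ¬ t.length ≥ 4)]
    rw [ih ('0' :: t) (by simp; omega) (by simp; omega)]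
    have h4 : 4 - t.length = (4 - ('0'::t).length) + 1 := by simp; omega
    rw [h4, List.replicate_succ']
    simp

lemma pvLen_toStr (n : Int) (h1 : -999 ≤ n) (h2 : n ≤ 9999) :
    (PySem.Int.toStr n).toList.length ≤ 4 := by
  rw [PySem.Int.toList_toStr]
  unfold PySem.Int.toChars
  split
  · next h =>
    have hlt : n.natAbs < 10 ^ 3 := by omega
    have := Nat.toDigits_length 10 n.natAbs 3 (by norm_num) hlt
    simp
    omega
  · next h =>
    have hlt : n.toNat < 10 ^ 4 := by omega
    have := Nat.toDigits_length 10 n.toNat 4 (by norm_num) hlt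
    omega

lemma pvChunk_filter (a b : Char) : pvScan (String.ofList [a, b]) = pvChunkVal a b := by
  unfold pvScan pvChunkVal
  by_cases hd : (PySem.Chars.isdigit a && PySem.Chars.isdigit b) = true
  · simp only [PySem.Chars.isdigit, Bool.and_eq_true, decide_eq_true_eq] at hd
    obtain ⟨⟨ha1, ha2⟩, hb1, hb2⟩ := hd
    simp only [Char.le_def] at ha1 ha2 hb1 hb2
    obtain ⟨na, hna1, hna2, rfl⟩ : ∃ m, 48 ≤ m ∧ m ≤ 57 ∧ a = Char.ofNat m :=
      ⟨a.toNat, ha1, ha2, (Char.ofNat_toNat a).symm⟩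
    obtain ⟨nb, hnb1, hnb2, rfl⟩ : ∃ m, 48 ≤ m ∧ m ≤ 57 ∧ b = Char.ofNat m :=
      ⟨b.toNat, hb1, hb2, (Char.ofNat_toNat b).symm⟩
    interval_cases na <;> interval_cases nb <;> decide
  · have hind : ∀ j < 26, PySem.Chars.isdigit ((pvInd.getD j "").toList.getD 0 ' ')
        ∧ PySem.Chars.isdigit ((pvInd.getD j "").toList.getD 1 ' ') := by decide
    have hfil : (List.range pvInd.length).filter
        (fun j => decide (String.ofList [a, b] = pvInd.getD j "")) = [] := by
      apply List.filter_eq_nil_iff.mpr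
      intro j hj
      simp only [List.mem_range] at hj
      simp only [decide_eq_true_eq]
      intro heq
      have h2 := congrArg String.toList heq
      simp only [String.toList_ofList] at h2
      have ha : PySem.Chars.isdigit a = true := by
        have := (hind j (by simpa [pvInd] using hj)).1
        rwa [← h2] at this
      have hb : PySem.Chars.isdigit b = true := by
        have := (hind j (by simpa [pvInd] using hj)).2
        rwa [← h2] at this
      exact hd (by simp [ha, hb])
    rw [hfil]
    have hs : PySem.Chars.strIsdigit [a, b] = (PySem.Chars.isdigit a && PySem.Chars.isdigit b) := by
      simp [PySem.Chars.strIsdigit]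
    have hff : (PySem.Chars.isdigit a && PySem.Chars.isdigit b) = false := by
      cases h : (PySem.Chars.isdigit a && PySem.Chars.isdigit b) <;> simp_all
    simp [hs, hff]

lemma pvElem (x : Int) (h1 : -999 ≤ x) (h2 : x ≤ 9999) :
    (pvScan (String.ofList [(pvPadA (PySem.Int.toStr x).toList).getD 0 ' ', (pvPadA (PySem.Int.toStr x).toList).getD 1 ' ']) ++
     pvScan (String.ofList [(pvPadA (PySem.Int.toStr x).toList).getD 2 ' ', (pvPadA (PySem.Int.toStr x).toList).getD 3 ' ']))
    = (pvH ((List.replicate (4 - (PySem.Int.toStr x).toList.length) '0' ++ (PySem.Int.toStr x).toList).take 2) ++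
       pvH ((List.replicate (4 - (PySem.Int.toStr x).toList.length) '0' ++ (PySem.Int.toStr x).toList).drop 2)) := by
  rw [pvPadA_eq _ (pvLen_toStr x h1 h2)]
  have hlen : (List.replicate (4 - (PySem.Int.toStr x).toList.length) '0' ++ (PySem.Int.toStr x).toList).length = 4 := by
    have h := pvLen_toStr x h1 h2
    simp only [List.length_append, List.length_replicate]
    omega
  generalize (List.replicate (4 - (PySem.Int.toStr x).toList.length) '0' ++ (PySem.Int.toStr x).toList) = s at hlen ⊢
  match s, hlen with
  | [a, b, c, d], _ =>
    rw [show ([a,b,c,d].getD 0 ' ') = a from rfl, show ([a,b,c,d].getD 1 ' ') = b from rfl,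
        show ([a,b,c,d].getD 2 ' ') = c from rfl, show ([a,b,c,d].getD 3 ' ') = d from rfl,
        show ([a,b,c,d].take 2) = [a,b] from rfl, show ([a,b,c,d].drop 2) = [c,d] from rfl]
    rw [pvChunk_filter a b, pvChunk_filter c d]
    simp [pvH, pvChunkVal]

-- ===== VERDICT (by name: the statement is the Claim_ definition above) =====
theorem bv2st_spec : Claim_equal_bv2st := by
  intro input hdom hpre
  unfold Spec_bv2st
  rw [pvA_eq, pvB_eq]
  induction input with
  | nil => rfl
  | cons x xs ih =>
    simp only [List.flatMap_cons]
    rw [pvElem x (hpre x (by simp)).1 (hpre x (by simp)).2]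
    have hdx : Dom_bv2st xs := by
      simp only [Dom_bv2st, List.all_cons, Bool.and_eq_true] at hdom
      exact hdom.2
    rw [ih hdx (fun y hy => hpre y (by simp [hy]))]
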